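-- pv_equiv track=rewrite | github.com/zubie7a/Algorithms | Google_Code_Jam/2018/Qualifier_Round/Saving_The_Universe_Again.py | laser_strength
-- ===== SOURCE A (Python) =====
-- def laser_strength(instructions):
--     strength = 1
--     energy   = 0
--     for i in range(0, len(instructions)):
--         char = instructions[i]
--         if (char == "S"):
--             energy += strength
--         elif (char == "C"):
--             strength *= 2
--     return energy
-- ===== SOURCE B (Python) =====
-- def laser_strength(instructions):
--     total = 0
--     for i, segment in enumerate(instructions.split('C')):
--         total += segment.count('S') * 2 ** i
--     return total
-- ===== Notes on version B (the rewrite author's own statement) =====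
-- stated objective: faster
-- what changed: Replaces the running-multiplier per-character scan keeping (strength, energy) state with a split-on-'C' decomposition: each segment between C's is weighted by 2**its index and the answer is the sum of per-segment S-counts times these weights.
import Mathlib
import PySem

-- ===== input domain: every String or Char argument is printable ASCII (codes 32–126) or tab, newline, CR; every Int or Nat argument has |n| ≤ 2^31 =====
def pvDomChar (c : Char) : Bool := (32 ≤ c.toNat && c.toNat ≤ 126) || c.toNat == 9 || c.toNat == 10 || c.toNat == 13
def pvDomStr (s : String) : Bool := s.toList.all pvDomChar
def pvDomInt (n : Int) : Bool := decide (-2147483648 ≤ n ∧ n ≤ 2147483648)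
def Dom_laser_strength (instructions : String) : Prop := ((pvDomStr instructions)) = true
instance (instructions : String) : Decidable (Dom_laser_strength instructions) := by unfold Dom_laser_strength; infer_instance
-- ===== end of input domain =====

-- B replaces A's running-multiplier per-character scan by split-on-'C' + weighted per-segment S-counts (a timing run measured B faster: the scanning moves into str.split/str.count).

-- ===== PORT A =====
-- literal port: for i in range(0, len(instructions)) reading instructions[i], state (strength, energy)
def laser_strength (instructions : String) : Int :=
  ((PySem.List.pyRange 0 (PySem.Str.len instructions) 1).foldl
    (fun (st : Int × Int) i =>
      let char := PySem.List.pyGetD instructions.toList i ' '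
      if char == 'S' then (st.1, st.2 + st.1)
      else if char == 'C' then (st.1 * 2, st.2)
      else st) (1, 0)).2

-- ===== PORT B =====
-- literal port of Source B: enumerate(instructions.split('C')), total += segment.count('S') * 2 ** i
def laser_strength_alt (instructions : String) : Int :=
  match PySem.Str.split? instructions "C" with
  | none => 0  -- unreachable: the separator "C" is nonempty
  | some segs =>
      (PySem.List.enumerate segs 0).foldl
        (fun total p => total + (PySem.Str.count p.2 "S" : Int) * 2 ^ p.1.toNat) 0

-- ===== PRECONDITION & SPEC =====
def Spec_laser_strength (instructions : String) (out : Int) : Prop := out = laser_strength_alt instructions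
instance (instructions : String) (out : Int) : Decidable (Spec_laser_strength instructions out) := by unfold Spec_laser_strength; infer_instance

-- ===== CLAIM (what is proved, stated in full; the proofs are below) =====
def Claim_equal_laser_strength : Prop := ∀ (instructions : String), Dom_laser_strength instructions → Spec_laser_strength instructions (laser_strength instructions)

-- ===== LEMMAS AND PROOFS =====

-- char-level value of the instruction string
def pvG : List Char → Int
  | [] => 0
  | c :: cs => if c == 'S' then 1 + pvG cs else if c == 'C' then 2 * pvG cs else pvG cs

-- structural form of split on the single character 'C'
def pvF : List Char → List (List Char)
  | [] => [[]]
  | c :: cs => if c = 'C' then [] :: pvF cs else (pvF cs).modifyHead (c :: ·)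

lemma pvF_ne_nil (cs : List Char) : pvF cs ≠ [] := by
  induction cs with
  | nil => simp [pvF]
  | cons c cs ih =>
    simp only [pvF]
    split_ifs
    · simp
    · cases h : pvF cs with
      | nil => exact absurd h ih
      | cons a t => simp [h]

lemma modifyHead_nil_append (l : List (List Char)) :
    l.modifyHead (fun x => ([] : List Char) ++ x) = l := by
  cases l <;> simp

lemma splitOn_go_single :
    ∀ (l : List Char) (fuel : Nat) (cur : List Char) (acc : List (List Char)),
      l.length < fuel →
      PySem.Chars.splitOn.go ['C'] fuel l cur acc
        = acc.reverse ++ (pvF l).modifyHead (cur.reverse ++ ·) := by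
  intro l
  induction l with
  | nil =>
    intro fuel cur acc h
    match fuel, h with
    | Nat.succ f, _ => simp [PySem.Chars.splitOn.go, pvF]
  | cons c rest ih =>
    intro fuel cur acc h
    match fuel, h with
    | Nat.succ f, h =>
      simp only [PySem.Chars.splitOn.go]
      by_cases hc : c = 'C'
      · subst hc
        rw [if_pos (by simp [List.isPrefixOf])]
        rw [show List.drop ['C'].length ('C' :: rest) = rest from rfl]
        rw [ih _ [] _ (by simpa using Nat.lt_of_succ_lt_succ h)]
        simp only [pvF, if_pos rfl, List.reverse_cons, List.reverse_nil, List.nil_append,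
          List.append_assoc, List.singleton_append]
        cases pvF rest <;> simp
      · rw [if_neg (by simp [List.isPrefixOf]; exact fun h' => hc h'.symm)]
        rw [ih _ (c :: cur) acc (by simpa using Nat.lt_of_succ_lt_succ h)]
        obtain ⟨a, t, hF⟩ := List.exists_cons_of_ne_nil (pvF_ne_nil rest)
        simp [pvF, hc, hF]

lemma splitOn_single_C (cs : List Char) : PySem.Chars.splitOn cs ['C'] = pvF cs := by
  unfold PySem.Chars.splitOn
  rw [splitOn_go_single cs (cs.length + 1) [] [] (Nat.lt_succ_self _)]
  simpa using modifyHead_nil_append (pvF cs)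

lemma count_go_single :
    ∀ (l : List Char) (fuel : Nat) (acc : Nat), l.length ≤ fuel →
      PySem.Chars.count.go ['S'] fuel l acc = acc + l.count 'S' := by
  intro l
  induction l with
  | nil =>
    intro fuel acc _
    cases fuel <;> simp [PySem.Chars.count.go]
  | cons c rest ih =>
    intro fuel acc h
    match fuel, h with
    | Nat.succ f, h =>
      simp only [PySem.Chars.count.go]
      by_cases hc : c = 'S'
      · subst hc
        rw [if_pos (by simp [List.isPrefixOf])]
        rw [show List.drop ['S'].length ('S' :: rest) = rest from rfl]
        rw [ih f (acc + 1) (by simpa using h)]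
        simp [List.count_cons]
        omega
      · rw [if_neg (by simp [List.isPrefixOf]; exact fun h' => hc h'.symm)]
        rw [ih f acc (by simpa using h)]
        simp [List.count_cons, hc]

lemma count_single_S (cs : List Char) : PySem.Chars.count cs ['S'] = cs.count 'S' := by
  unfold PySem.Chars.count
  rw [if_neg (by simp)]
  simpa using count_go_single cs cs.length 0 le_rfl

-- A's loop invariant
lemma afold (cs : List Char) : ∀ (st en : Int),
    (cs.foldl
      (fun (p : Int × Int) c =>
        if c == 'S' then (p.1, p.2 + p.1)
        else if c == 'C' then (p.1 * 2, p.2)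
        else p) (st, en)).2 = en + st * pvG cs := by
  induction cs with
  | nil => intro st en; simp [pvG]
  | cons c rest ih =>
    intro st en
    simp only [List.foldl_cons, pvG]
    split_ifs with h1 h2 <;> rw [ih] <;> ring

-- weighted sum of segments, B's semantics
def pvW : List (List Char) → Nat → Int
  | [], _ => 0
  | seg :: r, k => (seg.count 'S' : Int) * 2 ^ k + pvW r (k + 1)

lemma bfold (segs : List String) : ∀ (k : Nat) (acc : Int),
    (PySem.List.enumerate segs (k : Int)).foldl
      (fun total p => total + (PySem.Str.count p.2 "S" : Int) * 2 ^ p.1.toNat) acc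
      = acc + pvW (segs.map String.toList) k := by
  induction segs with
  | nil => intro k acc; simp [PySem.List.enumerate, pvW]
  | cons seg rest ih =>
    intro k acc
    rw [PySem.List.enumerate_cons]
    simp only [List.foldl_cons, List.map_cons, pvW]
    have : ((k : Int) + 1) = ((k + 1 : Nat) : Int) := by push_cast; ring
    rw [this, ih]
    have hcnt : PySem.Str.count seg "S" = seg.toList.count 'S' := by
      show PySem.Chars.count seg.toList "S".toList = _
      have : "S".toList = ['S'] := rfl
      rw [this, count_single_S]
    rw [hcnt]
    simp [Int.toNat_natCast]
    ring

lemma pvW_F (cs : List Char) : ∀ (k : Nat), pvW (pvF cs) k = 2 ^ k * pvG cs := by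
  induction cs with
  | nil => intro k; simp [pvF, pvW, pvG]
  | cons c rest ih =>
    intro k
    by_cases h1 : c = 'C'
    · subst h1
      rw [show pvF ('C' :: rest) = [] :: pvF rest by simp [pvF]]
      rw [show pvG ('C' :: rest) = 2 * pvG rest by simp [pvG]]
      simp only [pvW, List.count_nil, Nat.cast_zero, zero_mul, zero_add]
      rw [ih]; ring
    · obtain ⟨a, t, hF⟩ := List.exists_cons_of_ne_nil (pvF_ne_nil rest)
      have hfold : pvW (pvF (c :: rest)) k
          = ((c :: a).count 'S' : Int) * 2 ^ k + pvW t (k + 1) := by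
        simp [pvF, h1, hF, pvW]
      have hbase : pvW (pvF rest) k = (a.count 'S' : Int) * 2 ^ k + pvW t (k + 1) := by
        simp [hF, pvW]
      have hih := ih k
      rw [hbase] at hih
      by_cases h2 : c = 'S'
      · have hcnt : ((c :: a).count 'S' : Int) = (a.count 'S' : Int) + 1 := by
          simp [List.count_cons, h2]
        have hg : pvG (c :: rest) = 1 + pvG rest := by simp [pvG, h2]
        rw [hfold, hcnt, hg]
        push_cast at hih ⊢
        linarith
      · have hcnt : ((c :: a).count 'S' : Int) = (a.count 'S' : Int) := by
          simp [List.count_cons, h2]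
        have hg : pvG (c :: rest) = pvG rest := by simp [pvG, h1, h2]
        rw [hfold, hcnt, hg, ← hih]

lemma a_eq_g (s : String) : laser_strength s = pvG s.toList := by
  unfold laser_strength PySem.Str.len
  rw [PySem.List.foldl_pyRange_zero_pyGetD' s.toList ' '
    (fun (st : Int × Int) c =>
      if c == 'S' then (st.1, st.2 + st.1)
      else if c == 'C' then (st.1 * 2, st.2)
      else st) (1, 0)]
  rw [afold]
  ring

lemma b_eq_g (s : String) : laser_strength_alt s = pvG s.toList := by
  unfold laser_strength_alt
  have hsplit : PySem.Str.split? s "C"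
      = some ((PySem.Chars.splitOn s.toList ['C']).map String.ofList) := by
    show Option.map _ (PySem.Chars.split? s.toList "C".toList) = _
    have : "C".toList = ['C'] := rfl
    rw [this]
    simp [PySem.Chars.split?]
  rw [hsplit]
  simp only [splitOn_single_C]
  have h0 : (0 : Int) = ((0 : Nat) : Int) := rfl
  rw [h0, bfold]
  have : ((pvF s.toList).map String.ofList).map String.toList = pvF s.toList := by
    simp [List.map_map, Function.comp_def]
  rw [this, pvW_F]
  simp

-- ===== VERDICT (by name: the statement is the Claim_ definition above) =====
theorem laser_strength_spec : Claim_equal_laser_strength := by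
  intro s _
  show laser_strength s = laser_strength_alt s
  rw [a_eq_g, b_eq_g]
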